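-- pv_equiv track=rewrite | github.com/MAInformatico/Codewars | 7kyu/AllInclusive.py | contain_all_rots
-- ===== SOURCE A (Python) =====
-- def contain_all_rots(strng, arr):
--     rot = strng
--     if not len(arr) or not strng:
--         return True
--
--     for i in range(len(strng)):
--         if rot  not in arr:
--             return False
--
--         init_l = rot[0]
--         rot = rot[1:]
--         rot += init_l
--
--     return True
-- ===== SOURCE B (Python) =====
-- def contain_all_rots(strng, arr):
--     if not len(arr) or not strng:
--         return True
--     n = len(strng)
--     doubled = strng + strng
--     # an element of arr is a rotation of strng iff it has length n and occurs in strng+strng;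
--     # collect the distinct rotations that appear, in one pass over arr
--     found = {s for s in arr if len(s) == n and s in doubled}
--     # the number of distinct rotations of strng equals the smallest k >= 1 with
--     # strng occurring at offset k in strng+strng (the minimal rotation period)
--     return len(found) == doubled.find(strng, 1)
-- ===== Notes on version B (the rewrite author's own statement) =====
-- stated objective: alternative
-- what changed: B never enumerates rotations: it makes one pass over arr collecting the set of its elements that are rotations (length n and substring of strng+strng) and compares that set's size with the minimal rotation period of strng, computed as (strng+strng).find(strng, 1); A instead loops over all n rotations testing each for membership in arr.
import Mathlib
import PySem

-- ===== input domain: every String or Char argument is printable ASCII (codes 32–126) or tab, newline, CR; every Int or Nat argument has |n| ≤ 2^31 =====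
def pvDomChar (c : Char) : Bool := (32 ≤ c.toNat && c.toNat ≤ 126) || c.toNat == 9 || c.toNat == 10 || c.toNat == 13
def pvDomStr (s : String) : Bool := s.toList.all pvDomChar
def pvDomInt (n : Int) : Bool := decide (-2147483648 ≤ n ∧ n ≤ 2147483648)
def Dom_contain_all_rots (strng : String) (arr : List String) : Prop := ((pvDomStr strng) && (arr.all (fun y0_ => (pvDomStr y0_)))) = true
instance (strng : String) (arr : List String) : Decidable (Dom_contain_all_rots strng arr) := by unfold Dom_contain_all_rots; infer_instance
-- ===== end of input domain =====

-- B makes one pass over arr, collecting the set of elements that are rotations of strng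
-- (length n and substring of strng+strng), and compares that set's size with the number of
-- distinct rotations of strng, computed as the minimal rotation period (strng+strng).find(strng, 1);
-- A instead enumerates all rotations and scans arr for each one.

-- ===== PORT A =====
-- the 'for i in range(len(strng))' loop of A: rot is rotated one char per step
def pvRotLoopA (arrL : List (List Char)) (rot : List Char) : Nat → Bool
  | 0 => true
  | n + 1 =>
    if !(arrL.contains rot) then false
    else
      let init_l := PySem.List.pyGetD rot 0 ' '   -- rot[0]; rot is nonempty whenever the loop runs
      let rot' := PySem.List.slice rot (some 1) none   -- rot[1:]
      pvRotLoopA arrL (rot' ++ [init_l]) n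

def contain_all_rots (strng : String) (arr : List String) : Bool :=
  if arr.length == 0 || strng.toList.length == 0 then true
  else pvRotLoopA (arr.map String.toList) strng.toList strng.toList.length

-- ===== PORT B =====
def contain_all_rots_alt (strng : String) (arr : List String) : Bool :=
  if arr.length == 0 || strng.toList.length == 0 then true
  else
    let s := strng.toList
    let doubled := s ++ s
    -- {s for s in arr if len(s) == n and s in doubled}
    let found : PySem.Set (List Char) :=
      PySem.Set.ofList ((arr.map String.toList).filter
        (fun t => t.length == s.length && PySem.Chars.isIn t doubled))
    -- len(found) == doubled.find(strng, 1)
    PySem.Set.len found == PySem.Chars.findFrom doubled s 1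

-- ===== PRECONDITION & SPEC =====
def Spec_contain_all_rots (strng : String) (arr : List String) (out : Bool) : Prop := out = contain_all_rots_alt strng arr
instance (strng : String) (arr : List String) (out : Bool) : Decidable (Spec_contain_all_rots strng arr out) := by unfold Spec_contain_all_rots; infer_instance

-- ===== CLAIM (what is proved, stated in full; the proofs are below) =====
def Claim_equal_contain_all_rots : Prop := ∀ (strng : String) (arr : List String), Dom_contain_all_rots strng arr → Spec_contain_all_rots strng arr (contain_all_rots strng arr)

-- ===== LEMMAS AND PROOFS =====

-- one loop body step of A is List.rotate 1
lemma pvRotStep_eq_rotate (rot : List Char) (h : rot ≠ []) :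
    PySem.List.slice rot (some 1) none ++ [PySem.List.pyGetD rot 0 ' '] = rot.rotate 1 := by
  cases rot with
  | nil => exact absurd rfl h
  | cons a l =>
    simp [PySem.List.slice_from_one, PySem.List.pyGetD_zero, List.rotate_cons_succ]

lemma pvRotLoopA_iff (arrL : List (List Char)) (rot : List Char) (n : Nat) (h : rot ≠ []) :
    pvRotLoopA arrL rot n = true ↔ ∀ i < n, rot.rotate i ∈ arrL := by
  induction n generalizing rot with
  | zero => simp [pvRotLoopA]
  | succ n ih =>
    rw [pvRotLoopA]
    cases hc : arrL.contains rot with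
    | true =>
      have hne : rot.rotate 1 ≠ [] := by
        intro hx; exact h (by simpa using congrArg List.length hx)
      rw [if_neg (by simp)]
      show pvRotLoopA arrL (PySem.List.slice rot (some 1) none ++ [PySem.List.pyGetD rot 0 ' ']) n = true ↔ _
      rw [pvRotStep_eq_rotate rot h, ih (rot.rotate 1) hne]
      constructor
      · intro hall i hi
        cases i with
        | zero => simpa using hc
        | succ j =>
          have := hall j (by omega)
          simpa [List.rotate_rotate, Nat.add_comm] using this
      · intro hall i hi
        have := hall (i + 1) (by omega)
        simpa [List.rotate_rotate, Nat.add_comm] using this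
    | false =>
      rw [if_pos (by simp)]
      constructor
      · intro hf; exact absurd hf (by simp)
      · intro hall
        have h0 := hall 0 (by omega)
        rw [List.rotate_zero] at h0
        have hct : arrL.contains rot = true := by
          rw [List.contains_iff_mem]; exact h0
        rw [hc] at hct
        exact absurd hct (by simp)

-- rotating past a period is the identity
lemma pv_rotate_add_period (s : List Char) (p : Nat) (hp : s.rotate p = s) (x : Nat) :
    s.rotate (p + x) = s.rotate x := by
  rw [← List.rotate_rotate, hp]

-- every rotation index reduces mod a period
lemma pv_rotate_mod_period (s : List Char) (p : Nat) (hp1 : 1 ≤ p) (hp : s.rotate p = s) (m : Nat) :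
    s.rotate m = s.rotate (m % p) := by
  induction m using Nat.strong_induction_on with
  | _ m ih =>
    by_cases hm : m < p
    · rw [Nat.mod_eq_of_lt hm]
    · have h1 : s.rotate m = s.rotate (m - p) := by
        have := pv_rotate_add_period s p hp (m - p)
        rwa [Nat.add_sub_cancel' (by omega)] at this
      rw [h1, ih (m - p) (by omega)]
      congr 1
      exact (Nat.mod_eq_sub_mod (by omega)).symm

-- a rotation fixing s has index divisible by the minimal period
lemma pv_period_dvd (s : List Char) (p : Nat) (hp1 : 1 ≤ p) (hp : s.rotate p = s)
    (hmin : ∀ m, 1 ≤ m → m < p → s.rotate m ≠ s) (m : Nat) (hm : s.rotate m = s) : p ∣ m := by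
  have h := pv_rotate_mod_period s p hp1 hp m
  rw [hm] at h
  rcases Nat.eq_zero_or_pos (m % p) with h0 | h0
  · exact Nat.dvd_of_mod_eq_zero h0
  · exact absurd h.symm (hmin (m % p) h0 (Nat.mod_lt m (by omega)))

-- equal rotations have equal residues mod the minimal period
lemma pv_rotate_eq_iff (s : List Char) (p : Nat) (hp1 : 1 ≤ p) (hp : s.rotate p = s)
    (hmin : ∀ m, 1 ≤ m → m < p → s.rotate m ≠ s) (i j : Nat) (hi : i ≤ s.length) (hj : j ≤ s.length) :
    s.rotate i = s.rotate j ↔ i % p = j % p := by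
  constructor
  · intro h
    rcases Nat.le_total i j with hij | hij
    · have hfix : s.rotate (j - i) = s := by
        have h1 : s.rotate (i + (s.length - i)) = s := by
          rw [Nat.add_sub_cancel' hi, List.rotate_length]
        have h2 : s.rotate (j + (s.length - i)) = s := by
          rw [← List.rotate_rotate, ← h, List.rotate_rotate, h1]
        have h3 : j + (s.length - i) = (j - i) + s.length := by omega
        rw [h3, Nat.add_comm] at h2
        rw [pv_rotate_add_period s s.length (List.rotate_length s) (j - i)] at h2
        exact h2
      exact (Nat.modEq_iff_dvd' hij).mpr (pv_period_dvd s p hp1 hp hmin (j - i) hfix)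
    · have hfix : s.rotate (i - j) = s := by
        have h1 : s.rotate (j + (s.length - j)) = s := by
          rw [Nat.add_sub_cancel' hj, List.rotate_length]
        have h2 : s.rotate (i + (s.length - j)) = s := by
          rw [← List.rotate_rotate, h, List.rotate_rotate, h1]
        have h3 : i + (s.length - j) = (i - j) + s.length := by omega
        rw [h3, Nat.add_comm] at h2
        rw [pv_rotate_add_period s s.length (List.rotate_length s) (i - j)] at h2
        exact h2
      exact ((Nat.modEq_iff_dvd' hij).mpr (pv_period_dvd s p hp1 hp hmin (i - j) hfix)).symm
  · intro h
    rw [pv_rotate_mod_period s p hp1 hp i, pv_rotate_mod_period s p hp1 hp j, h]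

-- a length-n prefix of (s++s).drop j (j ≤ n) is the j-th rotation
lemma pv_prefix_drop_doubled (s : List Char) (j : Nat) (hj : j ≤ s.length) (t : List Char)
    (ht : t.length = s.length) : t <+: (s ++ s).drop j ↔ t = s.rotate j := by
  have hdrop : (s ++ s).drop j = s.drop j ++ s := by
    rw [List.drop_append_of_le_length hj]
  have htake : ((s ++ s).drop j).take s.length = s.rotate j := by
    rw [hdrop, List.take_append, List.take_of_length_le (by simp),
      List.rotate_eq_drop_append_take hj]
    congr 2
    simp only [List.length_drop]
    omega
  constructor
  · intro hpre
    have := List.prefix_iff_eq_take.mp hpre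
    rw [ht] at this
    rw [this, htake]
  · intro h
    rw [h, ← htake]
    exact List.take_prefix _ _

-- a length-n string is a substring of s++s iff it is a rotation of s
lemma pv_isIn_doubled_iff (s : List Char) (hs : s ≠ []) (t : List Char) (ht : t.length = s.length) :
    PySem.Chars.isIn t (s ++ s) = true ↔ ∃ i < s.length, t = s.rotate i := by
  have hn : 1 ≤ s.length := List.length_pos_iff.mpr hs
  rw [← PySem.Chars.exists_prefix_drop_iff_isIn]
  constructor
  · rintro ⟨j, hj⟩
    have hjle : j ≤ s.length := by
      have hlen := hj.length_le
      rw [ht, List.length_drop, List.length_append] at hlen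
      omega
    have := (pv_prefix_drop_doubled s j hjle t ht).mp hj
    by_cases hjn : j < s.length
    · exact ⟨j, hjn, this⟩
    · have hje : j = s.length := by omega
      refine ⟨0, by have := List.length_pos_iff.mpr hs; omega, ?_⟩
      rw [this, hje, List.rotate_length, List.rotate_zero]
  · rintro ⟨i, hi, hrot⟩
    exact ⟨i, (pv_prefix_drop_doubled s i (Nat.le_of_lt hi) t ht).mpr hrot⟩

-- characterisation of doubled.find(strng, 1): it is the minimal rotation period of s
lemma pv_findFrom_period (s : List Char) (hs : s ≠ []) :
    ∃ p : Nat, PySem.Chars.findFrom (s ++ s) s 1 = (p : Int) ∧ 1 ≤ p ∧ p ≤ s.length ∧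
      s.rotate p = s ∧ ∀ m, 1 ≤ m → m < p → s.rotate m ≠ s := by
  have hn : 1 ≤ s.length := List.length_pos_iff.mpr hs
  have h1le : (1 : Nat) ≤ (s ++ s).length := by simp; omega
  have hcast : (((1 : Nat) : Int)) = (1 : Int) := by norm_num
  have hnot : PySem.Chars.findFrom (s ++ s) s ((1 : Nat) : Int) ≠ -1 := by
    intro heq
    rw [PySem.Chars.findFrom_natCast_eq_neg_one_iff (s ++ s) s 1 h1le] at heq
    apply heq
    rw [List.drop_append_of_le_length hn]
    exact (List.suffix_append _ _).isInfix
  obtain ⟨hk1, hkpre, hkmin⟩ := PySem.Chars.findFrom_natCast_spec (s ++ s) s 1 h1le hnot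
  rw [hcast] at hk1 hkpre hkmin
  have hple : (PySem.Chars.findFrom (s ++ s) s (1 : Int)).toNat ≤ s.length := by
    by_contra hgt
    rw [Nat.not_le] at hgt
    have h2 := hkmin s.length hn hgt
    rw [List.drop_append_of_le_length le_rfl] at h2
    simp at h2
  refine ⟨(PySem.Chars.findFrom (s ++ s) s (1 : Int)).toNat, by omega, by omega, hple, ?_, ?_⟩
  · exact ((pv_prefix_drop_doubled s _ hple s rfl).mp hkpre).symm
  · intro m hm1 hmk heq
    exact hkmin m hm1 hmk ((pv_prefix_drop_doubled s m (by omega) s rfl).mpr heq.symm)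

-- the size of the set of rotations found in arr equals the period iff every rotation is in arr
lemma pv_found_length (s : List Char) (hs : s ≠ []) (arrL : List (List Char)) (p : Nat)
    (hp1 : 1 ≤ p) (hpn : p ≤ s.length) (hprot : s.rotate p = s)
    (hpmin : ∀ m, 1 ≤ m → m < p → s.rotate m ≠ s) :
    (PySem.Set.ofList (arrL.filter
        (fun t => t.length == s.length && PySem.Chars.isIn t (s ++ s)))).length = p
      ↔ ∀ i < s.length, s.rotate i ∈ arrL := by
  set F := PySem.Set.ofList (arrL.filter
    (fun t => t.length == s.length && PySem.Chars.isIn t (s ++ s))) with hF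
  have hnodup : F.Nodup := PySem.Set.nodup_ofList _
  have hmemF : ∀ t : List Char, t ∈ F ↔ t ∈ arrL ∧ ∃ i < s.length, t = s.rotate i := by
    intro t
    rw [hF, PySem.Set.mem_ofList, List.mem_filter]
    constructor
    · rintro ⟨h1, h2⟩
      rw [Bool.and_eq_true, beq_iff_eq] at h2
      exact ⟨h1, (pv_isIn_doubled_iff s hs t h2.1).mp h2.2⟩
    · rintro ⟨h1, i, hi, hrot⟩
      refine ⟨h1, ?_⟩
      rw [Bool.and_eq_true, beq_iff_eq]
      have hlen : t.length = s.length := by rw [hrot]; simp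
      exact ⟨hlen, (pv_isIn_doubled_iff s hs t hlen).mpr ⟨i, hi, hrot⟩⟩
  set R := (List.range p).map s.rotate with hR
  have hRnodup : R.Nodup := by
    refine List.Nodup.map_on ?_ List.nodup_range
    intro i hi j hj hij
    rw [List.mem_range] at hi hj
    have h := (pv_rotate_eq_iff s p hp1 hprot hpmin i j (by omega) (by omega)).mp hij
    rwa [Nat.mod_eq_of_lt (by omega), Nat.mod_eq_of_lt (by omega)] at h
  have hmemR : ∀ t, t ∈ R ↔ ∃ i < p, t = s.rotate i := by
    intro t; rw [hR]; simp [eq_comm]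
  have hRlen : R.length = p := by simp [hR]
  constructor
  · intro hlen i hi
    by_contra hnot
    have hmodeq := pv_rotate_mod_period s p hp1 hprot i
    have hmodlt : i % p < p := Nat.mod_lt _ (by omega)
    have hsub : F.toFinset ⊆ R.toFinset.erase (s.rotate (i % p)) := by
      intro t ht
      rw [List.mem_toFinset, hmemF] at ht
      obtain ⟨htarr, j, hj, hrot⟩ := ht
      rw [Finset.mem_erase, List.mem_toFinset, hmemR]
      constructor
      · intro heq
        apply hnot
        rw [hmodeq, ← heq]
        exact htarr
      · exact ⟨j % p, Nat.mod_lt _ (by omega),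
          by rw [hrot, pv_rotate_mod_period s p hp1 hprot j]⟩
    have hrmem : s.rotate (i % p) ∈ R.toFinset := by
      rw [List.mem_toFinset, hmemR]
      exact ⟨i % p, hmodlt, rfl⟩
    have hle := Finset.card_le_card hsub
    rw [Finset.card_erase_of_mem hrmem, List.toFinset_card_of_nodup hnodup,
      List.toFinset_card_of_nodup hRnodup, hRlen, hlen] at hle
    omega
  · intro hall
    have hfin : F.toFinset = R.toFinset := by
      ext t
      rw [List.mem_toFinset, List.mem_toFinset, hmemF, hmemR]
      constructor
      · rintro ⟨ht, j, hj, hrot⟩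
        exact ⟨j % p, Nat.mod_lt _ (by omega),
          by rw [hrot, pv_rotate_mod_period s p hp1 hprot j]⟩
      · rintro ⟨j, hj, hrot⟩
        refine ⟨?_, j, by omega, hrot⟩
        rw [hrot]
        exact hall j (by omega)
    calc F.length = F.toFinset.card := (List.toFinset_card_of_nodup hnodup).symm
      _ = R.toFinset.card := by rw [hfin]
      _ = R.length := List.toFinset_card_of_nodup hRnodup
      _ = p := hRlen

-- ===== VERDICT (by name: the statement is the Claim_ definition above) =====
theorem contain_all_rots_spec : Claim_equal_contain_all_rots := by
  intro strng arr _
  unfold Spec_contain_all_rots contain_all_rots contain_all_rots_alt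
  by_cases hg : (arr.length == 0 || strng.toList.length == 0) = true
  · rw [if_pos hg, if_pos hg]
  · rw [if_neg hg, if_neg hg]
    have hne : strng.toList ≠ [] := by
      intro hx
      apply hg
      simp [hx]
    obtain ⟨p, hkp, hp1, hpn, hprot, hpmin⟩ := pv_findFrom_period strng.toList hne
    rw [Bool.eq_iff_iff, pvRotLoopA_iff _ _ _ hne]
    show (∀ i < strng.toList.length, strng.toList.rotate i ∈ arr.map String.toList) ↔
      ((((PySem.Set.ofList ((arr.map String.toList).filter
          (fun t => t.length == strng.toList.length &&
            PySem.Chars.isIn t (strng.toList ++ strng.toList)))).length : Int)) ==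
        PySem.Chars.findFrom (strng.toList ++ strng.toList) strng.toList 1) = true
    rw [hkp, beq_iff_eq, Int.natCast_inj]
    exact (pv_found_length strng.toList hne (arr.map String.toList) p hp1 hpn hprot hpmin).symm
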